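-- pv_equiv track=rewrite | github.com/opn2gr93rgfed/test6 | src/utils/script_parser.py | _optimize_actions
-- ===== SOURCE A (Python) =====
-- from typing import Dict, List, Tuple, Optional
--
-- def _optimize_actions(actions: List[Dict]) -> List[Dict]:
--     """
--     Оптимизирует действия:
--     - Убирает клики перед send_keys
--     - Убирает дублирующиеся действия
--     """
--     optimized = []
--     i = 0
--
--     while i < len(actions):
--         current = actions[i]
--         next_action = actions[i + 1] if i + 1 < len(actions) else None
--
--         # Если это клик и следующее - ввод текста, пропустить клик
--         if (current['type'] == 'click' and
--             next_action and
--             next_action['type'] == 'type'):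
--             # Пропустить клик, он избыточен
--             i += 1
--             continue
--
--         optimized.append(current)
--         i += 1
--
--     return optimized
-- ===== SOURCE B (Python) =====
-- from typing import Dict, List, Tuple, Optional
--
-- def _optimize_actions(actions: List[Dict]) -> List[Dict]:
--     """Single forward pass with a one-element 'pending click' buffer (no index lookahead)."""
--     optimized = []
--     pending = None
--     for action in actions:
--         if pending is not None:
--             if action['type'] != 'type':
--                 optimized.append(pending)
--             pending = None
--         if action['type'] == 'click':
--             pending = action
--         else:
--             optimized.append(action)
--     if pending is not None:
--         optimized.append(pending)
--     return optimized
-- ===== Notes on version B (the rewrite author's own statement) =====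
-- stated objective: alternative
-- what changed: Replaced the index-based while loop with i+1 lookahead by a single forward pass that buffers a pending click and decides from the following element, flushing the buffer at the end.
-- outside the precondition, e.g. on _optimize_actions([{'type': 'click'}, {}]): A raises KeyError, B raises KeyError
import Mathlib
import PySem

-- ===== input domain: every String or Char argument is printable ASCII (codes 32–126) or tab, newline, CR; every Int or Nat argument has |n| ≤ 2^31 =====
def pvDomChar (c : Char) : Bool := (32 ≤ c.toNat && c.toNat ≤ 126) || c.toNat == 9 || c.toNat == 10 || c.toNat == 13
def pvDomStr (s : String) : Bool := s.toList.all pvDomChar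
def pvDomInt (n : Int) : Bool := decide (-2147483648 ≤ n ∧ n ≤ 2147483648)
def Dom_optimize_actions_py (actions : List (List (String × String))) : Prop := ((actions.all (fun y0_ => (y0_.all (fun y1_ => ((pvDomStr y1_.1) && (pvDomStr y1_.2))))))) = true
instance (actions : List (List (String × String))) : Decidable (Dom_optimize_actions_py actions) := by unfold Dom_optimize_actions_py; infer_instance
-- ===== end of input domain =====

-- B replaces A's index+lookahead while loop by a one-pass pending-click buffer; same cost, different decomposition.

-- ===== PORT A =====
-- current['type'] / next_action['type']: first-match dict lookup; Pre_ guarantees the key exists,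
-- so getD with "" default is exact there.
def pvTy (d : List (String × String)) : String := PySem.Dict.getD (PySem.Dict.mk d) "type" ""

-- the while loop of A: i advances by 1 every iteration, so it is structural recursion on the
-- remaining list; next_action = actions[i+1] if it exists = head? of the tail.
-- 'next_action and' is Python dict truthiness: the dict must be non-empty.
def optimize_actions_py (actions : List (List (String × String))) : List (List (String × String)) :=
  match actions with
  | [] => []
  | cur :: rest =>
    if pvTy cur = "click" ∧ (∃ nxt, rest.head? = some nxt ∧ nxt ≠ [] ∧ pvTy nxt = "type") then
      optimize_actions_py rest
    else
      cur :: optimize_actions_py rest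

-- ===== PORT B =====
-- the for loop of Source B, carried out as structural recursion with the 'pending' buffer as state;
-- output is emitted in order (emissions of one iteration, then the rest of the loop).
def pvBLoop (pending : Option (List (String × String))) (actions : List (List (String × String))) : List (List (String × String)) :=
  match actions with
  | [] => match pending with
          | some p => [p]
          | none => []
  | a :: rest =>
    (match pending with
     | some p => if pvTy a ≠ "type" then [p] else []
     | none => []) ++
    (if pvTy a = "click" then pvBLoop (some a) rest else a :: pvBLoop none rest)

def optimize_actions_py_alt (actions : List (List (String × String))) : List (List (String × String)) :=
  pvBLoop none actions

-- ===== PRECONDITION & SPEC =====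
-- Pre_ excludes inputs where A raises KeyError: every action dict must contain the key 'type'
-- (each element becomes `current` at some iteration, so a missing 'type' always raises).
def Pre_optimize_actions_py (actions : List (List (String × String))) : Prop :=
  ∀ a ∈ actions, (PySem.Dict.get? (PySem.Dict.mk a) "type").isSome
instance (actions : List (List (String × String))) : Decidable (Pre_optimize_actions_py actions) := by unfold Pre_optimize_actions_py; infer_instance

def pvWitness_optimize_actions_py : (List (List (String × String))) :=
  [[("type", "click")], [("type", "type"), ("text", "hi")], [("type", "click")]]

def Spec_optimize_actions_py (actions : List (List (String × String))) (out : List (List (String × String))) : Prop := out = optimize_actions_py_alt actions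
instance (actions : List (List (String × String))) (out : List (List (String × String))) : Decidable (Spec_optimize_actions_py actions out) := by unfold Spec_optimize_actions_py; infer_instance

-- ===== CLAIM (what is proved, stated in full; the proofs are below) =====
def Claim_equal_optimize_actions_py : Prop := ∀ (actions : List (List (String × String))), Dom_optimize_actions_py actions → Pre_optimize_actions_py actions → Spec_optimize_actions_py actions (optimize_actions_py actions)

-- ===== LEMMAS AND PROOFS =====

-- an action with a 'type' key is a non-empty dict (Python truthiness of next_action)
lemma pv_hasType_ne_nil (a : List (String × String))
    (h : (PySem.Dict.get? (PySem.Dict.mk a) "type").isSome) : a ≠ [] := by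
  intro hnil; subst hnil
  simp [PySem.Dict.get?] at h

-- joint loop invariant: starting with no pending click, B's pass equals A's loop on the
-- remaining list; and with a pending non-empty click p, B's pass equals A's loop on p :: l.
lemma pv_loops_agree (l : List (List (String × String)))
    (hpre : Pre_optimize_actions_py l) :
    optimize_actions_py l = pvBLoop none l ∧
    (∀ p, pvTy p = "click" → p ≠ [] → optimize_actions_py (p :: l) = pvBLoop (some p) l) := by
  induction l with
  | nil =>
    constructor
    · simp [optimize_actions_py, pvBLoop]
    · intro p hp hne
      simp [optimize_actions_py, pvBLoop]
  | cons a rest ih =>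
    have hpre_rest : Pre_optimize_actions_py rest := fun x hx => hpre x (List.mem_cons_of_mem _ hx)
    have ha : (PySem.Dict.get? (PySem.Dict.mk a) "type").isSome := hpre a (List.mem_cons_self)
    have hane : a ≠ [] := pv_hasType_ne_nil a ha
    obtain ⟨ih1, ih2⟩ := ih hpre_rest
    have part1 : optimize_actions_py (a :: rest) = pvBLoop none (a :: rest) := by
      by_cases hc : pvTy a = "click"
      · -- A: lookahead decision deferred; B: stashes a as pending
        rw [pvBLoop]
        simp only [hc, if_true, List.nil_append]
        exact ih2 a hc hane
      · rw [optimize_actions_py, pvBLoop]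
        have : ¬ (pvTy a = "click" ∧ (∃ nxt, rest.head? = some nxt ∧ nxt ≠ [] ∧ pvTy nxt = "type")) := by
          intro h; exact hc h.1
        rw [if_neg this, if_neg hc, ih1]
        simp
    refine ⟨part1, ?_⟩
    intro p hp hpne
    by_cases ht : pvTy a = "type"
    · -- the pending click is redundant: A skips it, B drops it
      have hcond : pvTy p = "click" ∧ (∃ nxt, (a :: rest).head? = some nxt ∧ nxt ≠ [] ∧ pvTy nxt = "type") :=
        ⟨hp, a, rfl, hane, ht⟩
      have hnc : pvTy a ≠ "click" := by rw [ht]; decide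
      rw [optimize_actions_py, if_pos hcond, pvBLoop]
      rw [optimize_actions_py]
      have : ¬ (pvTy a = "click" ∧ (∃ nxt, rest.head? = some nxt ∧ nxt ≠ [] ∧ pvTy nxt = "type")) := by
        intro h; exact hnc h.1
      rw [if_neg this, if_neg hnc, ih1]
      simp [ht]
    · -- a is not 'type': A keeps the click, B flushes the pending buffer
      have hcond : ¬ (pvTy p = "click" ∧ (∃ nxt, (a :: rest).head? = some nxt ∧ nxt ≠ [] ∧ pvTy nxt = "type")) := by
        rintro ⟨-, nxt, hnxt, -, hty⟩
        simp only [List.head?_cons, Option.some.injEq] at hnxt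
        exact ht (hnxt ▸ hty)
      rw [optimize_actions_py, if_neg hcond, part1]
      simp [pvBLoop, ht]

-- ===== VERDICT (by name: the statement is the Claim_ definition above) =====
theorem optimize_actions_py_spec : Claim_equal_optimize_actions_py := by
  intro actions _ hpre
  unfold Spec_optimize_actions_py optimize_actions_py_alt
  exact (pv_loops_agree actions hpre).1
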